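-- pv_equiv track=rewrite | github.com/harubert/cad-by-ai | src/gz_cadquery.py | edges_bbox
-- ===== SOURCE A (Python) =====
-- def edges_bbox(all_edge_lists):
--     """Compute bounding box of edge lists."""
--     xs, ys = [], []
--     for edges in all_edge_lists:
--         for edge in edges:
--             for x, y in edge:
--                 xs.append(x)
--                 ys.append(y)
--     if not xs:
--         return 0, 0, 1, 1
--     return min(xs), min(ys), max(xs), max(ys)
-- ===== SOURCE B (Python) =====
-- def edges_bbox(all_edge_lists):
--     """Compute bounding box of edge lists."""
--     bounds = None
--     for edges in all_edge_lists:
--         for edge in edges: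
--             for x, y in edge:
--                 if bounds is None:
--                     bounds = (x, y, x, y)
--                 else:
--                     bounds = (min(bounds[0], x), min(bounds[1], y),
--                               max(bounds[2], x), max(bounds[3], y))
--     if bounds is None:
--         return 0, 0, 1, 1
--     return bounds
-- ===== Notes on version B (the rewrite author's own statement) =====
-- stated objective: simpler
-- what changed: Replaces building two full coordinate lists followed by four separate min/max scans with a single running min/max accumulator updated in one pass; no intermediate lists are allocated.
import Mathlib
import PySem

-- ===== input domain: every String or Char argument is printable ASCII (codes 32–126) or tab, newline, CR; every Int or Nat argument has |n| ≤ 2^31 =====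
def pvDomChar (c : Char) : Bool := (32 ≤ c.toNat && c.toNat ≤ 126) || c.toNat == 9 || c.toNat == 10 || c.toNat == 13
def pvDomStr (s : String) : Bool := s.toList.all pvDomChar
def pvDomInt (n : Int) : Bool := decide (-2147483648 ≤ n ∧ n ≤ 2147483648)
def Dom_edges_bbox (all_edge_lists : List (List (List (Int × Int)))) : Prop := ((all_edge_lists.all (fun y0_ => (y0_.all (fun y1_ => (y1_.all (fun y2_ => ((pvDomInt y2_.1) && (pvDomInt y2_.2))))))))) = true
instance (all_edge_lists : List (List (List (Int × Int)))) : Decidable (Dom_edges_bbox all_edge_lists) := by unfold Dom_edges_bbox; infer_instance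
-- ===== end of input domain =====

-- B replaces "collect two coordinate lists, then four min/max scans" with a single
-- running-bounds accumulator updated in one pass (simpler, no intermediate lists).


-- ===== PORT A =====
-- loop body of A: append x to xs, y to ys
def bbStepA (acc : List Int × List Int) (p : Int × Int) : List Int × List Int :=
  (acc.1 ++ [p.1], acc.2 ++ [p.2])

def edges_bbox (all_edge_lists : List (List (List (Int × Int)))) : Int × Int × Int × Int :=
  let st := all_edge_lists.foldl (fun acc edges =>
    edges.foldl (fun acc edge => edge.foldl bbStepA acc) acc) ([], [])
  let xs := st.1
  let ys := st.2
  if xs = [] then (0, 0, 1, 1)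
  else ((PySem.List.min? xs (fun v => v)).getD 0, (PySem.List.min? ys (fun v => v)).getD 0,
        (PySem.List.max? xs (fun v => v)).getD 0, (PySem.List.max? ys (fun v => v)).getD 0)

-- ===== PORT B =====
-- loop body of B: update the running bounds (None = nothing seen yet)
def bbStepB (o : Option (Int × Int × Int × Int)) (p : Int × Int) : Option (Int × Int × Int × Int) :=
  match o with
  | none => some (p.1, p.2, p.1, p.2)
  | some (a, b, c, d) => some (min a p.1, min b p.2, max c p.1, max d p.2)

def edges_bbox_alt (all_edge_lists : List (List (List (Int × Int)))) : Int × Int × Int × Int :=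
  let bounds := all_edge_lists.foldl (fun acc edges =>
    edges.foldl (fun acc edge => edge.foldl bbStepB acc) acc) none
  match bounds with
  | none => (0, 0, 1, 1)
  | some r => r

-- ===== PRECONDITION & SPEC =====
def Spec_edges_bbox (all_edge_lists : List (List (List (Int × Int)))) (out : Int × Int × Int × Int) : Prop := out = edges_bbox_alt all_edge_lists
instance (all_edge_lists : List (List (List (Int × Int)))) (out : Int × Int × Int × Int) : Decidable (Spec_edges_bbox all_edge_lists out) := by unfold Spec_edges_bbox; infer_instance

-- ===== CLAIM (what is proved, stated in full; the proofs are below) =====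
def Claim_equal_edges_bbox : Prop := ∀ (all_edge_lists : List (List (List (Int × Int)))), Dom_edges_bbox all_edge_lists → Spec_edges_bbox all_edge_lists (edges_bbox all_edge_lists)

-- ===== LEMMAS AND PROOFS =====

-- the flattened point sequence both triple loops traverse
def bbFlat (l : List (List (List (Int × Int)))) : List (Int × Int) :=
  l.flatMap (fun edges => edges.flatMap (fun e => e))

-- A's nested fold = append the coordinate projections of the flattened points
theorem bbA_edge (edge : List (Int × Int)) (acc : List Int × List Int) :
    edge.foldl bbStepA acc = (acc.1 ++ edge.map Prod.fst, acc.2 ++ edge.map Prod.snd) := by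
  induction edge generalizing acc with
  | nil => simp
  | cons p t ih => simp [bbStepA, ih]

theorem bbA_edges (edges : List (List (Int × Int))) (acc : List Int × List Int) :
    edges.foldl (fun acc edge => edge.foldl bbStepA acc) acc =
      (acc.1 ++ (edges.flatMap (fun e => e)).map Prod.fst,
       acc.2 ++ (edges.flatMap (fun e => e)).map Prod.snd) := by
  induction edges generalizing acc with
  | nil => simp
  | cons e t ih =>
    rw [List.foldl_cons, ih, bbA_edge]
    simp

theorem bbA_all (l : List (List (List (Int × Int)))) (acc : List Int × List Int) :
    l.foldl (fun acc edges => edges.foldl (fun acc edge => edge.foldl bbStepA acc) acc) acc =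
      (acc.1 ++ (bbFlat l).map Prod.fst, acc.2 ++ (bbFlat l).map Prod.snd) := by
  induction l generalizing acc with
  | nil => simp [bbFlat]
  | cons e t ih =>
    rw [List.foldl_cons, ih, bbA_edges]
    simp [bbFlat]

-- B's nested fold = a single fold of bbStepB over the flattened points
theorem bbB_edges (edges : List (List (Int × Int))) (o : Option (Int × Int × Int × Int)) :
    edges.foldl (fun acc edge => edge.foldl bbStepB acc) o =
      (edges.flatMap (fun e => e)).foldl bbStepB o := by
  induction edges generalizing o with
  | nil => simp
  | cons e t ih => simp [ih, List.foldl_append]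

theorem bbB_all (l : List (List (List (Int × Int)))) (o : Option (Int × Int × Int × Int)) :
    l.foldl (fun acc edges => edges.foldl (fun acc edge => edge.foldl bbStepB acc) acc) o =
      (bbFlat l).foldl bbStepB o := by
  induction l generalizing o with
  | nil => simp [bbFlat]
  | cons e t ih =>
    rw [List.foldl_cons, ih, bbB_edges]
    simp [bbFlat, List.foldl_append]

-- the running-bounds fold from a seeded state is four running min/max folds
def bbStepS (s : Int × Int × Int × Int) (p : Int × Int) : Int × Int × Int × Int :=
  (min s.1 p.1, min s.2.1 p.2, max s.2.2.1 p.1, max s.2.2.2 p.2)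

theorem bbB_some (ps : List (Int × Int)) (s : Int × Int × Int × Int) :
    ps.foldl bbStepB (some s) = some (ps.foldl bbStepS s) := by
  induction ps generalizing s with
  | nil => rfl
  | cons p t ih =>
    obtain ⟨a, b, c, d⟩ := s
    simp [bbStepB, bbStepS, ih]

theorem bbS_eq (t : List (Int × Int)) (a b c d : Int) :
    t.foldl bbStepS (a, b, c, d) =
      ((t.map Prod.fst).foldl min a, (t.map Prod.snd).foldl min b,
       (t.map Prod.fst).foldl max c, (t.map Prod.snd).foldl max d) := by
  induction t generalizing a b c d with
  | nil => rfl
  | cons p t ih => simp [bbStepS, ih]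

-- ===== VERDICT (by name: the statement is the Claim_ definition above) =====
theorem edges_bbox_spec : Claim_equal_edges_bbox := by
  intro l _
  unfold Spec_edges_bbox edges_bbox edges_bbox_alt
  rw [bbA_all, bbB_all]
  cases h : bbFlat l with
  | nil => simp
  | cons p t =>
    rw [List.foldl_cons, show bbStepB none p = some (p.1, p.2, p.1, p.2) from rfl,
      bbB_some, bbS_eq]
    dsimp only
    simp only [List.map_cons, List.nil_append]
    rw [if_neg (List.cons_ne_nil _ _), PySem.List.min?_id_cons, PySem.List.min?_id_cons,
      PySem.List.max?_id_cons, PySem.List.max?_id_cons]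
    simp
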